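-- pv_equiv track=rewrite | github.com/HHongSeongJae/CodingTest | Programmers/LV1_과일장수.py | solution
-- ===== SOURCE A (Python) =====
-- def solution(k, m, score):
--
--     score.sort(reverse=True)
--     answer = 0
--     new = []
--     for i in score:
--         if(i <= k):
--             new.append(i)
--
--     box = int(len(new) / m)
--
--     contain = []
--     idx= 0
--     i = 0
--     for _ in range(box):
--         i += m
--         contain.append(new[idx:i])
--         idx = i
--
--
--     for n in contain:
--         minN = min(n)
--         answer += minN * m
--
--     return answer
-- ===== SOURCE B (Python) =====
-- def solution(k, m, score):
--     # Ascending view: after discarding the remainder-sized prefix of smallest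
--     # kept scores, every m-th element (starting at len % m) is a box minimum.
--     asc = sorted(s for s in score if s <= k)
--     return m * sum(asc[i] for i in range(len(asc) % m, len(asc), m))
-- ===== Notes on version B (the rewrite author's own statement) =====
-- stated objective: simpler
-- what changed: A sorts descending, slices the kept scores into explicit m-sized box sublists and scans each with min(); B sorts ascending, drops the len%m smallest kept scores by starting a single stride at that modulo offset, and sums every m-th element directly - no boxes, no min() scans, no box-building loop.
import Mathlib
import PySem

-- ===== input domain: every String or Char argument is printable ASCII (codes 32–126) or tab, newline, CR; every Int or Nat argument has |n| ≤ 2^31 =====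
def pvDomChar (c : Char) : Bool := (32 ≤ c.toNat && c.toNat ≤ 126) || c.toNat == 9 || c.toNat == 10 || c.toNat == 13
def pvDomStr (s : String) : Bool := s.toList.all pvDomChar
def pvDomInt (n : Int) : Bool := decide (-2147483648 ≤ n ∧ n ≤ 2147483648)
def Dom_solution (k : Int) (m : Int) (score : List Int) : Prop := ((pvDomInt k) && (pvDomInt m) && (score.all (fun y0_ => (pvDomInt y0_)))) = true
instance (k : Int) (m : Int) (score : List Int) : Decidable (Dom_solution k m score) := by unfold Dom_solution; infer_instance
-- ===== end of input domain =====

-- B sorts ascending and sums every m-th kept score starting at the len%m offset,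
-- replacing A's descending sort + box slices + per-box min scan; same results, simpler.
-- Note: A sorts `score` in place (caller-visible mutation); B does not — the claim is about return values.

-- ===== PORT A =====
def solution (k : Int) (m : Int) (score : List Int) : Int :=
  let score := PySem.List.sorted score (fun x => x) true
  let new := score.foldl (fun acc i => if i ≤ k then acc ++ [i] else acc) ([] : List Int)
  -- int(len(new) / m): exact truncating division on this domain (|values| < 2^53)
  let box := PySem.Int.truncdiv (new.length : Int) m
  let st := (PySem.List.pyRange 0 box).foldl
    (fun (st : List (List Int) × Int × Int) _ =>
      (st.1 ++ [PySem.List.slice new (some st.2.1) (some (st.2.2 + m))], st.2.2 + m, st.2.2 + m))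
    ([], 0, 0)
  -- min([]) would raise in Python; unreachable for m ≠ 0, the default 0 is never used
  st.1.foldl (fun answer n => answer + ((PySem.List.min? n (fun y => y)).getD 0) * m) 0

-- ===== PORT B =====
def solution_alt (k : Int) (m : Int) (score : List Int) : Int :=
  let asc := PySem.List.sorted (score.filter (fun s => decide (s ≤ k))) (fun x => x) false
  -- asc[i] is always in range for i generated by the stride; the default 0 is never used
  m * (PySem.List.pyRange (PySem.Int.mod (asc.length : Int) m) (asc.length : Int) m).foldl
        (fun acc i => acc + (PySem.List.pyGet? asc i).getD 0) 0

-- ===== PRECONDITION & SPEC =====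
-- Pre_ excludes exactly m = 0, where Python A raises ZeroDivisionError.
def Pre_solution (k : Int) (m : Int) (score : List Int) : Prop := m ≠ 0
instance (k : Int) (m : Int) (score : List Int) : Decidable (Pre_solution k m score) := by unfold Pre_solution; infer_instance
def pvWitness_solution : Int × Int × List Int := (10, 2, [4, 1, 2, 7, 3, 8])

def Spec_solution (k : Int) (m : Int) (score : List Int) (out : Int) : Prop := out = solution_alt k m score
instance (k : Int) (m : Int) (score : List Int) (out : Int) : Decidable (Spec_solution k m score out) := by unfold Spec_solution; infer_instance

-- ===== CLAIM (what is proved, stated in full; the proofs are below) =====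
def Claim_equal_solution : Prop := ∀ (k : Int) (m : Int) (score : List Int), Dom_solution k m score → Pre_solution k m score → Spec_solution k m score (solution k m score)

-- ===== LEMMAS AND PROOFS =====

-- the ascending sort is the reverse of the descending sort (Int values, ≤ antisymmetric)
lemma asc_eq_desc_reverse (xs : List Int) :
    PySem.List.sorted xs (fun x => x) false = (PySem.List.sorted xs (fun x => x) true).reverse := by
  refine List.eq_of_perm_of_sorted (le := fun a b : Int => a ≤ b)
    (fun a b _ _ h1 h2 => le_antisymm h1 h2) ?_ ?_ ?_
  · exact PySem.List.sorted_pairwise xs (fun x => x)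
  · exact List.pairwise_reverse.mpr (PySem.List.sorted_pairwise_rev xs (fun x => x))
  · exact (PySem.List.sorted_perm xs _ false).trans
      ((PySem.List.sorted_perm xs _ true).symm.trans (List.reverse_perm _).symm)

-- A's filter loop over the sorted list builds the same list as sorting the filtered list.
lemma new_eq (k : Int) (score : List Int) :
    (PySem.List.sorted score (fun x => x) true).filter (fun s => decide (s ≤ k))
      = PySem.List.sorted (score.filter (fun s => decide (s ≤ k))) (fun x => x) true := by
  refine List.eq_of_perm_of_sorted (le := fun a b : Int => b ≤ a)
    (fun a b _ _ h1 h2 => le_antisymm h2 h1) ?_ ?_ ?_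
  · exact (PySem.List.sorted_pairwise_rev score (fun x => x)).sublist List.filter_sublist
  · exact PySem.List.sorted_pairwise_rev _ _
  · exact ((PySem.List.sorted_perm score _ true).filter _).trans
      (PySem.List.sorted_perm _ _ true).symm

-- the running minimum over a descending list is its last element
lemma foldl_min_desc (t : List Int) : ∀ (x : Int), List.Pairwise (fun a b : Int => b ≤ a) (x :: t) →
    t.foldl min x = (x :: t).getLast (List.cons_ne_nil x t) := by
  induction t with
  | nil => intro x _; simp
  | cons y t ih =>
      intro x hp
      rcases List.pairwise_cons.mp hp with ⟨h1, h2⟩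
      have hxy : min x y = y := min_eq_right (h1 y (by simp))
      simp only [List.foldl_cons, hxy]
      rw [ih y h2]
      simp [List.getLast_cons]

-- state of A's box-building loop after b iterations
lemma stateA (d : List Int) (m : Int) (b : Nat) :
    (PySem.List.pyRange 0 (b : Int)).foldl
      (fun (st : List (List Int) × Int × Int) _ =>
        (st.1 ++ [PySem.List.slice d (some st.2.1) (some (st.2.2 + m))], st.2.2 + m, st.2.2 + m))
      ([], 0, 0)
    = ((List.range b).map (fun (j : Nat) => PySem.List.slice d (some ((j : Int) * m)) (some ((j : Int) * m + m))),
       (b : Int) * m, (b : Int) * m) := by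
  induction b with
  | zero => simp [PySem.List.pyRange_one_eq_nil]
  | succ b ih =>
      have hcast : ((b + 1 : Nat) : Int) = (b : Int) + 1 := by push_cast; ring
      rw [hcast, PySem.List.pyRange_one_succ_right (by exact_mod_cast Nat.zero_le b),
        List.foldl_append, ih]
      simp only [List.foldl_cons, List.foldl_nil, List.range_succ, List.map_append,
        List.map_cons, List.map_nil, Prod.mk.injEq]
      exact ⟨trivial, by ring, by ring⟩

-- one box: the min of A's slice times m equals m times the strided element of the descending list
lemma term_eq (d : List Int) (hd : List.Pairwise (fun a b : Int => b ≤ a) d)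
    (M : Nat) (hM : 1 ≤ M) (j : Nat) (hlen : (j + 1) * M ≤ d.length) :
    ((PySem.List.min? (PySem.List.slice d (some ((j : Int) * (M : Int)))
        (some ((j : Int) * (M : Int) + (M : Int)))) (fun y => y)).getD 0) * (M : Int)
      = (M : Int) * ((PySem.List.pyGet? d (((j * M + M - 1 : Nat) : Int))).getD 0) := by
  have he : (j + 1) * M = j * M + M := by ring
  have hidx : j * M + M - 1 < d.length := by omega
  have e1 : (j : Int) * (M : Int) = ((j * M : Nat) : Int) := by push_cast; ring
  have hslice : PySem.List.slice d (some ((j : Int) * (M : Int))) (some ((j : Int) * (M : Int) + (M : Int)))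
      = (d.drop (j * M)).take M := by
    rw [e1]; exact_mod_cast PySem.List.slice_natCast_add d (j * M) M
  have hclen : ((d.drop (j * M)).take M).length = M := by simp; omega
  obtain ⟨x, t, hxt⟩ : ∃ x t, (d.drop (j * M)).take M = x :: t := by
    cases h : (d.drop (j * M)).take M with
    | nil => rw [h] at hclen; simp at hclen; omega
    | cons x t => exact ⟨x, t, rfl⟩
  have hcpair : List.Pairwise (fun a b : Int => b ≤ a) (x :: t) :=
    hd.sublist (hxt ▸ ((List.take_sublist _ _).trans (List.drop_sublist _ _)))
  have hxtlen : (x :: t).length = M := by rw [← hxt]; exact hclen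
  have hlast : (x :: t).getLast (List.cons_ne_nil x t) = d[j * M + M - 1]'hidx := by
    rw [List.getLast_eq_getElem]
    have hi : (x :: t).length - 1 < ((d.drop (j * M)).take M).length := by rw [hxt]; simp
    rw [List.getElem_of_eq hxt.symm, List.getElem_take, List.getElem_drop]
    have hidx2 : j * M + ((x :: t).length - 1) = j * M + M - 1 := by rw [hxtlen]; omega
    simp only [hidx2]
  rw [hslice, hxt, PySem.List.min?_id_cons, foldl_min_desc t x hcpair, hlast,
    PySem.List.pyGet?_natCast, List.getElem?_eq_getElem hidx]
  simp [mul_comm]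

-- summing a reflected index map equals summing the map itself
lemma sum_reflect (n : Nat) (f : Nat → Int) :
    ((List.range n).map (fun j => f (n - 1 - j))).sum = ((List.range n).map f).sum := by
  have h : (List.range n).map (fun j => f (n - 1 - j)) = ((List.range n).map f).reverse := by
    apply List.ext_getElem
    · simp
    · intro p h1 h2
      simp only [List.getElem_map, List.getElem_range, List.getElem_reverse,
        List.length_map, List.length_range]
  rw [h, List.sum_reverse]

-- int(n / m) for m < 0 and n ≥ 0 is ≤ 0 (so A builds no boxes)
lemma truncdiv_nonpos (n : Nat) (m : Int) (hm : m ≤ -1) : PySem.Int.truncdiv (n : Int) m ≤ 0 := by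
  have h1 := Int.tdiv_nonneg (a := (n : Int)) (b := -m) (by positivity) (by omega)
  have key : PySem.Int.truncdiv (n : Int) m = -((n : Int).tdiv (-m)) := by
    rw [PySem.Int.truncdiv]
    conv_lhs => rw [show m = -(-m) by ring]
    rw [Int.tdiv_neg]
  omega

-- range(r, t, m) for m < 0 and r ≤ t is empty (so B sums no strides)
lemma pyRange_neg_nil (a b s : Int) (hs : s < 0) (hab : a ≤ b) :
    PySem.List.pyRange a b s = [] := by
  simp only [PySem.List.pyRange]
  rw [if_neg (by omega : ¬ s = 0), if_neg (by omega : ¬ 0 < s), if_neg (by omega : ¬ b < a)]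
  simp

-- for m > 0 A's truncating box count is Nat division
lemma truncdiv_pos_eq (n : Nat) (m : Int) (hm : 0 < m) :
    PySem.Int.truncdiv (n : Int) m = ((n / m.toNat : Nat) : Int) := by
  rw [show m = (m.toNat : Int) by omega]
  simp [PySem.Int.truncdiv]

-- B's stride range for m > 0, spelled over Nat data: exactly box = t / M indices
lemma strideB (t M : Nat) (hM : 1 ≤ M) :
    PySem.List.pyRange (((t % M : Nat) : Int)) ((t : Nat) : Int) ((M : Nat) : Int)
      = (List.range (t / M)).map (fun (j : Nat) => ((t % M : Nat) : Int) + ((M : Nat) : Int) * (j : Int)) := by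
  have hMpos : (0 : Int) < (M : Int) := by exact_mod_cast hM
  have hcount : (if ((t % M : Nat) : Int) < ((t : Nat) : Int)
      then ((((t : Nat) : Int) - ((t % M : Nat) : Int) + ((M : Nat) : Int) - 1) / ((M : Nat) : Int)).toNat
      else 0) = t / M := by
    by_cases h : ((t % M : Nat) : Int) < ((t : Nat) : Int)
    · rw [if_pos h]
      have hle : t % M ≤ t := Nat.mod_le t M
      have e1 : ((t : Nat) : Int) - ((t % M : Nat) : Int) + ((M : Nat) : Int) - 1
          = ((t - t % M + M - 1 : Nat) : Int) := by
        push_cast [Nat.cast_sub hle, Nat.cast_sub (by omega : 1 ≤ t - t % M + M)]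
        ring
      have e2 : t - t % M = M * (t / M) := by
        have := Nat.div_add_mod t M; omega
      have hnat : (t - t % M + M - 1) / M = t / M := by
        have e3 : t - t % M + M - 1 = M * (t / M) + (M - 1) := by
          obtain ⟨q, hq⟩ : ∃ q, M * (t / M) = q := ⟨_, rfl⟩
          rw [hq] at e2 ⊢
          omega
        rw [e3, Nat.mul_add_div (by omega : 0 < M), Nat.div_eq_of_lt (show M - 1 < M by omega), Nat.add_zero]
      rw [e1, ← Int.natCast_div, Int.toNat_natCast, hnat]
    · rw [if_neg h]
      have h2 : t ≤ t % M := by exact_mod_cast not_lt.mp h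
      have ht : t < M := by
        rcases Nat.lt_or_ge t M with h' | h'
        · exact h'
        · exfalso; have := Nat.mod_lt t (show 0 < M by omega); omega
      exact (Nat.div_eq_of_lt ht).symm
  rw [PySem.List.pyRange_of_pos _ _ hMpos, hcount]

-- ===== VERDICT (by name: the statement is the Claim_ definition above) =====
theorem solution_spec : Claim_equal_solution := by
  intro k m score _ hm
  unfold Pre_solution at hm
  unfold Spec_solution solution solution_alt
  dsimp only
  have hfun : (fun (acc : List Int) i => if i ≤ k then acc ++ [i] else acc)
      = (fun (acc : List Int) i => if (fun s => decide (s ≤ k)) i = true then acc ++ [(fun y => y) i] else acc) := by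
    funext acc i; by_cases h : i ≤ k <;> simp [h]
  rw [hfun, PySem.List.foldl_append_if, List.nil_append, List.map_id_fun', id_eq, new_eq,
    asc_eq_desc_reverse]
  set N := PySem.List.sorted (score.filter (fun s => decide (s ≤ k))) (fun x => x) true with hN
  rw [List.length_reverse]
  rcases lt_or_gt_of_ne hm with hneg | hpos
  · -- m < 0: A builds no boxes, B's stride range is empty; both sides are 0
    rw [PySem.List.pyRange_one_eq_nil (truncdiv_nonpos N.length m (by omega)),
      pyRange_neg_nil _ _ _ hneg
        (le_trans (PySem.Int.mod_neg_bounds (N.length : Int) hneg).2 (by positivity))]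
    simp
  · -- m > 0
    have hMm : (m.toNat : Int) = m := by omega
    have hM1 : 1 ≤ m.toNat := by omega
    rw [truncdiv_pos_eq N.length m hpos, ← hMm]
    simp only [Int.toNat_natCast]
    set M := m.toNat with hM
    set t := N.length with ht
    set b := t / M with hb
    -- A's side: fold the box list into a sum of strided descending elements
    rw [stateA N ((M : Nat) : Int) b, PySem.List.foldl_add]
    simp only [List.map_map, zero_add]
    have hA : ((List.range b).map
        ((fun n => (PySem.List.min? n (fun y => y)).getD 0 * (M : Int)) ∘
          fun (j : Nat) => PySem.List.slice N (some ((j : Int) * (M : Int))) (some ((j : Int) * (M : Int) + (M : Int))))).sum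
        = ((List.range b).map
            (fun (j : Nat) => (M : Int) * ((PySem.List.pyGet? N (((j * M + M - 1 : Nat) : Int))).getD 0))).sum := by
      apply congrArg
      apply List.map_congr_left
      intro j hj
      have hjb : j < b := List.mem_range.mp hj
      have hlen : (j + 1) * M ≤ t :=
        le_trans (Nat.mul_le_mul_right M hjb) (Nat.div_mul_le_self t M)
      simp only [Function.comp]
      exact term_eq N (PySem.List.sorted_pairwise_rev _ _) M hM1 j hlen
    rw [hA, List.sum_map_mul_left]
    -- B's side: fold the stride range into a sum of strided ascending elements
    rw [PySem.Int.mod_natCast, strideB t M hM1, List.foldl_map, PySem.List.foldl_add, zero_add,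
      ← hb]
    congr 1
    rw [← sum_reflect b (fun j => (PySem.List.pyGet? N (((j * M + M - 1 : Nat) : Int))).getD 0)]
    refine congrArg List.sum (List.map_congr_left ?_).symm
    intro j hj
    have hjb : j < b := List.mem_range.mp hj
    -- the strided ascending index, as a Nat
    have hidxcast : ((t % M : Nat) : Int) + ((M : Nat) : Int) * (j : Int)
        = ((t % M + M * j : Nat) : Int) := by push_cast; ring
    have hbm : b * M ≤ t := Nat.div_mul_le_self t M
    have hmod : t % M + M * b = t := by
      have := Nat.div_add_mod t M
      calc t % M + M * b = M * (t / M) + t % M := by rw [hb]; ring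
        _ = t := Nat.div_add_mod t M
    have hidxlt : t % M + M * j < t := by
      have h1 : M * j + M ≤ M * b := by
        have : j + 1 ≤ b := hjb
        calc M * j + M = M * (j + 1) := by ring
          _ ≤ M * b := Nat.mul_le_mul_left M this
      omega
    have hreflt : t - 1 - (t % M + M * j) = (b - 1 - j) * M + M - 1 := by
      have hXY : M * j + (b - 1 - j) * M + M = M * b := by
        have : j + (b - 1 - j) + 1 = b := by omega
        calc M * j + (b - 1 - j) * M + M = M * (j + (b - 1 - j) + 1) := by ring
          _ = M * b := by rw [this]
      omega
    have hlen2 : (b - 1 - j) * M + M - 1 < t := by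
      have h1 : ((b - 1 - j) + 1) * M ≤ b * M := by
        apply Nat.mul_le_mul_right; omega
      omega
    rw [hidxcast, PySem.List.pyGet?_natCast, PySem.List.pyGet?_natCast,
      List.getElem?_eq_getElem (by simpa using hidxlt),
      List.getElem?_eq_getElem (by omega)]
    simp only [Option.getD_some]
    rw [List.getElem_reverse]
    exact getElem_congr_idx (by rw [← ht]; exact hreflt)
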